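-- pv_equiv track=rewrite | github.com/pypi-data/pypi-mirror-404 | packages/souleyez/souleyez-3.0.7-py3-none-any.whl/souleyez/intelligence/target_parser.py | _parse_nmap_args
-- ===== SOURCE A (Python) =====
-- from typing import Dict, List, Optional
--
-- def _parse_nmap_args(args: Optional[List]) -> Dict:
--     """
--     Parse Nmap arguments to extract port info.
--
--     Examples:
--         ['-p', '22,80,443'] → {'ports': [22, 80, 443]}
--         ['-p', '1-1000'] → {'ports': range(1, 1001)}
--         ['-sV', '-p-'] → {}  # Full port scan
--     """
--     result = {}
--
--     if not args:
--         return result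
--
--     # Look for -p flag
--     try:
--         p_idx = args.index("-p")
--         if p_idx + 1 < len(args):
--             port_spec = args[p_idx + 1]
--
--             # Handle full port scan
--             if port_spec == "-":
--                 return result
--
--             # Handle comma-separated ports
--             if "," in port_spec:
--                 ports = []
--                 for p in port_spec.split(","):
--                     if "-" in p:
--                         # Range like 20-25
--                         start, end = map(int, p.split("-"))
--                         ports.extend(range(start, end + 1))
--                     else:
--                         ports.append(int(p))
--                 result["ports"] = ports
--
--             # Handle port range
--             elif "-" in port_spec:
--                 start, end = map(int, port_spec.split("-"))
--                 result["ports"] = list(range(start, end + 1))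
--
--             # Single port
--             else:
--                 result["ports"] = [int(port_spec)]
--
--     except (ValueError, IndexError):
--         pass
--
--     return result
-- ===== SOURCE B (Python) =====
-- from typing import Dict, List, Optional
--
--
-- def _expand(token):
--     """Expand one token: a single port, or 'lo-hi' cut at its only dash."""
--     d = token.find("-")
--     if d < 0:
--         return [int(token)]
--     if "-" in token[d + 1:]:
--         raise ValueError(f"invalid port range: {token!r}")
--     return list(range(int(token[:d]), int(token[d + 1:]) + 1))
--
--
-- def _ports_of(spec):
--     """Recursive descent on the raw spec: token before the first comma, then the rest."""
--     c = spec.find(",")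
--     if c < 0:
--         return _expand(spec)
--     return _expand(spec[:c]) + _ports_of(spec[c + 1:])
--
--
-- def _parse_nmap_args(args: Optional[List]) -> Dict:
--     """Parse Nmap arguments to extract port info (recursive-descent version)."""
--     result = {}
--
--     if not args:
--         return result
--
--     try:
--         p_idx = args.index("-p")
--         if p_idx + 1 < len(args):
--             result["ports"] = _ports_of(args[p_idx + 1])
--     except (ValueError, IndexError):
--         pass
--
--     return result
-- ===== Notes on version B (the rewrite author's own statement) =====
-- stated objective: alternative
-- what changed: Replaces A's three-way shape dispatch with its staged split(',')/split('-') passes and append/extend loop by a recursive-descent parser over the raw spec string: str.find plus slicing peels off one token per recursive call and each token is expanded by cutting at its single dash, building the port list by concatenation; no split() call and no loop remain.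
import Mathlib
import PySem

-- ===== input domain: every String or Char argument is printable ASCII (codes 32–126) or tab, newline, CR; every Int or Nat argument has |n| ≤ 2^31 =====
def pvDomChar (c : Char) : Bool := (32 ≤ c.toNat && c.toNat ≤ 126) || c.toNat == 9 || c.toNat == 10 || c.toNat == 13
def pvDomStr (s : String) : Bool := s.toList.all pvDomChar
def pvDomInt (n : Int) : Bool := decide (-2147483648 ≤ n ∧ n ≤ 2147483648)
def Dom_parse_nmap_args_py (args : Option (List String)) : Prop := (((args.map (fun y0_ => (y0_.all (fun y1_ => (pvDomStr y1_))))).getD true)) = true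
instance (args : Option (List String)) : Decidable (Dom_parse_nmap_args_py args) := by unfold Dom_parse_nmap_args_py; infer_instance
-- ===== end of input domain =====

-- B replaces A's three-way shape dispatch and its staged split(',')/split('-') passes by a
-- recursive-descent parser over the raw spec string (find + slicing, one token per recursive call);
-- objective: alternative decomposition, same cost. A catches every exception it can raise, so no
-- Pre_ is needed: the claim is plain equality on the whole domain.

-- ===== PORT A =====
-- the line `start, end = map(int, p.split("-"))`: exactly two pieces, both parsed by int(); none = ValueError
def pvInt2 (parts : List String) : Option (Int × Int) :=
  match parts with
  | [a, b] =>
    match PySem.Int.ofStr? a, PySem.Int.ofStr? b with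
    | some s, some e => some (s, e)
    | _, _ => none
  | _ => none

-- A's comma branch: `for p in port_spec.split(','): …` building `ports`; none = exception in the loop
def pvCommaLoopA : List String → List Int → Option (List Int)
  | [], ports => some ports
  | p :: rest, ports =>
    if PySem.Str.isIn "-" p then
      match pvInt2 ((PySem.Str.split? p "-").getD []) with  -- sep "-" ≠ "" so split? is always some
      | some (s, e) => pvCommaLoopA rest (ports ++ PySem.List.pyRange s (e + 1) 1)
      | none => none
    else
      match PySem.Int.ofStr? p with
      | some v => pvCommaLoopA rest (ports ++ [v])
      | none => none

-- the try-block's body: none = a raised ValueError/IndexError (caught → result stays {})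
def pvTryBodyA (args : List String) : Option (List (String × List Int)) :=
  match PySem.List.index? args "-p" with
  | none => none  -- args.index('-p') raises ValueError
  | some p_idx =>
    if p_idx + 1 < args.length then
      let port_spec := args.getD (p_idx + 1) ""  -- args[p_idx+1], index in bounds
      if port_spec == "-" then some []
      else if PySem.Str.isIn "," port_spec then
        match pvCommaLoopA ((PySem.Str.split? port_spec ",").getD []) [] with
        | some ports => some [("ports", ports)]
        | none => none
      else if PySem.Str.isIn "-" port_spec then
        match pvInt2 ((PySem.Str.split? port_spec "-").getD []) with
        | some (s, e) => some [("ports", PySem.List.pyRange s (e + 1) 1)]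
        | none => none
      else
        match PySem.Int.ofStr? port_spec with
        | some v => some [("ports", [v])]
        | none => none
    else some []

def parse_nmap_args_py (args : Option (List String)) : List (String × List Int) :=
  match args with
  | none => []           -- `if not args: return result`
  | some l =>
    if l.isEmpty then []
    else
      match pvTryBodyA l with
      | some r => r
      | none => []       -- except (ValueError, IndexError): pass

-- ===== PORT B =====
-- B's `_expand`: cut the token at its only '-' (token.find + slices); none = a raised ValueError
def pvExpand (token : List Char) : Option (List Int) :=
  let d := PySem.Chars.find token ['-']
  if d < 0 then (PySem.Int.ofChars? token).map (fun v => [v])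
  else if PySem.Chars.isIn ['-'] (PySem.List.slice token (some (d + 1)) none) then
    none  -- raise ValueError("invalid port range: …")
  else
    match PySem.Int.ofChars? (PySem.List.slice token none (some d)),
          PySem.Int.ofChars? (PySem.List.slice token (some (d + 1)) none) with
    | some lo, some hi => some (PySem.List.pyRange lo (hi + 1) 1)
    | _, _ => none

-- termination of B's `_ports_of`: the slice after the first comma is strictly shorter
theorem pvSliceAfterComma_lt (s : List Char) (h : ¬ PySem.Chars.find s [','] < 0) :
    (PySem.List.slice s (some (PySem.Chars.find s [','] + 1)) none).length < s.length := by
  have h0 : 0 ≤ PySem.Chars.find s [','] := by omega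
  obtain ⟨hpre, -⟩ := PySem.Chars.find_spec (s := s) (sub := [',']) h0
  have hlt : (PySem.Chars.find s [',']).toNat < s.length := by
    by_contra hge
    have : s.drop (PySem.Chars.find s [',']).toNat = [] := List.drop_eq_nil_of_le (by omega)
    rw [this] at hpre
    exact absurd (List.eq_nil_of_prefix_nil hpre) (by simp)
  rw [PySem.List.slice_from _ (by omega)]
  simp only [List.length_drop]
  omega

-- B's `_ports_of`: recursive descent, one token (up to the first comma) per call
def pvPortsOf (spec : List Char) : Option (List Int) :=
  let c := PySem.Chars.find spec [',']
  if _h : c < 0 then pvExpand spec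
  else
    match pvExpand (PySem.List.slice spec none (some c)),
          pvPortsOf (PySem.List.slice spec (some (c + 1)) none) with
    | some hd, some tl => some (hd ++ tl)
    | _, _ => none
termination_by spec.length
decreasing_by exact pvSliceAfterComma_lt spec _h

def parse_nmap_args_py_alt (args : Option (List String)) : List (String × List Int) :=
  match args with
  | none => []
  | some l =>
    if l.isEmpty then []
    else
      match PySem.List.index? l "-p" with
      | none => []       -- ValueError caught
      | some p_idx =>
        if p_idx + 1 < l.length then
          match pvPortsOf (l.getD (p_idx + 1) "").toList with
          | some ports => [("ports", ports)]
          | none => []   -- the parse raised → caught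
        else []

-- ===== PRECONDITION & SPEC =====
def Spec_parse_nmap_args_py (args : Option (List String)) (out : List (String × List Int)) : Prop := out = parse_nmap_args_py_alt args
instance (args : Option (List String)) (out : List (String × List Int)) : Decidable (Spec_parse_nmap_args_py args out) := by unfold Spec_parse_nmap_args_py; infer_instance

-- ===== CLAIM (what is proved, stated in full; the proofs are below) =====
def Claim_equal_parse_nmap_args_py : Prop := ∀ (args : Option (List String)), Dom_parse_nmap_args_py args → Spec_parse_nmap_args_py args (parse_nmap_args_py args)

-- ===== LEMMAS AND PROOFS =====

-- splitOn.go: the accumulator is only ever prepended to the (reversed) output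
theorem pvGoAcc (sep : List Char) (fuel : Nat) (s cur : List Char) (acc : List (List Char)) :
    PySem.Chars.splitOn.go sep fuel s cur acc = acc.reverse ++ PySem.Chars.splitOn.go sep fuel s cur [] := by
  induction fuel generalizing s cur acc with
  | zero => simp [PySem.Chars.splitOn.go]
  | succ n ih =>
    cases s with
    | nil => simp [PySem.Chars.splitOn.go]
    | cons c rest =>
      rw [PySem.Chars.splitOn.go, PySem.Chars.splitOn.go]
      by_cases hp : sep.isPrefixOf (c :: rest) = true
      · simp only [hp, if_true]
        rw [ih _ _ (cur.reverse :: acc), ih _ _ [cur.reverse]]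
        simp
      · simp only [hp, if_false, Bool.false_eq_true]
        rw [ih rest (c :: cur) acc]

-- splitOn.go ignores the exact fuel as soon as it exceeds the input length
theorem pvGoFuel (sep : List Char) (hsep : sep ≠ []) (fuel fuel' : Nat) (s cur : List Char)
    (acc : List (List Char)) (h : s.length < fuel) (h' : s.length < fuel') :
    PySem.Chars.splitOn.go sep fuel s cur acc = PySem.Chars.splitOn.go sep fuel' s cur acc := by
  induction fuel generalizing fuel' s cur acc with
  | zero => omega
  | succ n ih =>
    cases fuel' with
    | zero => omega
    | succ m =>
      cases s with
      | nil => simp [PySem.Chars.splitOn.go]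
      | cons c rest =>
        rw [PySem.Chars.splitOn.go, PySem.Chars.splitOn.go]
        by_cases hp : sep.isPrefixOf (c :: rest) = true
        · simp only [hp, if_true]
          have hlen : sep.length ≤ (c :: rest).length := (List.isPrefixOf_iff_prefix.mp hp).length_le
          have h1 : ((c :: rest).drop sep.length).length < n := by
            simp only [List.length_drop, List.length_cons] at *
            have : 1 ≤ sep.length := by cases sep with | nil => exact absurd rfl hsep | cons a t => simp
            omega
          exact ih _ _ _ _ h1 (by
            simp only [List.length_drop, List.length_cons] at *
            have : 1 ≤ sep.length := by cases sep with | nil => exact absurd rfl hsep | cons a t => simp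
            omega)
        · simp only [hp, if_false, Bool.false_eq_true]
          exact ih _ rest (c :: cur) acc (by simp at h ⊢; omega) (by simp at h' ⊢; omega)

-- splitting on a character that never occurs keeps the whole remainder as one piece
theorem pvGoNo (ch : Char) (fuel : Nat) (s cur : List Char) (acc : List (List Char))
    (h : ch ∉ s) :
    PySem.Chars.splitOn.go [ch] fuel s cur acc = acc.reverse ++ [cur.reverse ++ s] := by
  induction fuel generalizing s cur acc with
  | zero => simp [PySem.Chars.splitOn.go]
  | succ n ih =>
    cases s with
    | nil => simp [PySem.Chars.splitOn.go]
    | cons c rest =>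
      have hc : (ch == c) = false := by
        simp only [beq_eq_false_iff_ne, ne_eq]
        intro e
        exact h (e ▸ List.mem_cons_self)
      have hrest : ch ∉ rest := fun hm => h (List.mem_cons_of_mem _ hm)
      rw [PySem.Chars.splitOn.go]
      simp only [List.isPrefixOf, hc, Bool.false_and, Bool.false_eq_true, if_false]
      rw [ih rest (c :: cur) acc hrest]
      simp

theorem pvSplitOnNo (ch : Char) (s : List Char) (h : ch ∉ s) :
    PySem.Chars.splitOn s [ch] = [s] := by
  unfold PySem.Chars.splitOn
  rw [pvGoNo ch _ s [] [] h]
  simp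

-- splitting at the first occurrence: the prefix becomes one token, the suffix is split recursively
theorem pvGoFirst (ch : Char) (pre suf cur : List Char) (acc : List (List Char)) (fuel : Nat)
    (hpre : ch ∉ pre) (hfuel : (pre ++ ch :: suf).length < fuel) :
    PySem.Chars.splitOn.go [ch] fuel (pre ++ ch :: suf) cur acc
      = acc.reverse ++ (cur.reverse ++ pre) :: PySem.Chars.splitOn suf [ch] := by
  induction pre generalizing fuel cur acc with
  | nil =>
    cases fuel with
    | zero => simp at hfuel
    | succ n =>
      rw [List.nil_append, PySem.Chars.splitOn.go]
      have hp : List.isPrefixOf [ch] (ch :: suf) = true := by simp [List.isPrefixOf]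
      simp only [hp, if_true, List.length_cons, List.length_nil, List.drop_succ_cons, List.drop_zero]
      rw [pvGoAcc]
      unfold PySem.Chars.splitOn
      rw [pvGoFuel [ch] (by simp) n (suf.length + 1) suf [] [] (by simp at hfuel; omega) (by omega)]
      simp
  | cons c pre' ih =>
    cases fuel with
    | zero => simp at hfuel
    | succ n =>
      rw [List.cons_append, PySem.Chars.splitOn.go]
      have hc : (ch == c) = false := by
        simp only [beq_eq_false_iff_ne, ne_eq]
        intro e
        exact hpre (e ▸ List.mem_cons_self)
      simp only [List.isPrefixOf, hc, Bool.false_and, Bool.false_eq_true, if_false]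
      rw [ih (c :: cur) acc n (fun hm => hpre (List.mem_cons_of_mem _ hm)) (by simp at hfuel ⊢; omega)]
      simp

theorem pvSplitOnFirst (ch : Char) (pre suf : List Char) (hpre : ch ∉ pre) :
    PySem.Chars.splitOn (pre ++ ch :: suf) [ch] = pre :: PySem.Chars.splitOn suf [ch] := by
  unfold PySem.Chars.splitOn
  rw [pvGoFirst ch pre suf [] [] _ hpre (by omega)]
  simp
  rfl

-- a nonnegative find of a single character decomposes the list at its first occurrence
theorem pvFindDecomp (ch : Char) (s : List Char) (h : 0 ≤ PySem.Chars.find s [ch]) :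
    s = s.take (PySem.Chars.find s [ch]).toNat ++ ch :: s.drop ((PySem.Chars.find s [ch]).toNat + 1)
      ∧ ch ∉ s.take (PySem.Chars.find s [ch]).toNat := by
  obtain ⟨hpre, hmin⟩ := PySem.Chars.find_spec (s := s) (sub := [ch]) h
  set d := (PySem.Chars.find s [ch]).toNat with hd
  have hlt : d < s.length := by
    by_contra hge
    have : s.drop d = [] := List.drop_eq_nil_of_le (by omega)
    rw [this] at hpre
    exact absurd (List.eq_nil_of_prefix_nil hpre) (by simp)
  have hdrop : s.drop d = s[d] :: s.drop (d + 1) := List.drop_eq_getElem_cons hlt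
  have hch : s[d] = ch := by
    obtain ⟨t, ht⟩ := hpre
    rw [hdrop] at ht
    simp only [List.singleton_append, List.cons.injEq] at ht
    exact ht.1.symm
  constructor
  · conv_lhs => rw [← List.take_append_drop d s]
    rw [hdrop, hch]
  · intro hmem
    obtain ⟨i, hi, hget⟩ := List.mem_iff_getElem.mp hmem
    have hlen : i < d := by simp at hi; omega
    have hilen : i < s.length := by omega
    apply hmin i hlen
    have hgs : s[i]'hilen = ch := by
      have h2 : (List.take d s)[i]'hi = s[i]'hilen := List.getElem_take
      rw [← h2]
      exact hget
    rw [List.drop_eq_getElem_cons hilen, hgs]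
    exact ⟨s.drop (i + 1), rfl⟩

theorem pvNotMemOfFindNeg (ch : Char) (s : List Char) (h : PySem.Chars.find s [ch] < 0) :
    ch ∉ s := by
  intro hm
  have : [ch] <:+: s := (List.singleton_infix_iff ch s).mpr hm
  have := (PySem.Chars.find_nonneg_iff (s := s) (sub := [ch])).mpr this
  omega

-- splitOn never returns the empty list
theorem pvGoNeNil (sep : List Char) (fuel : Nat) (s cur : List Char) (acc : List (List Char)) :
    PySem.Chars.splitOn.go sep fuel s cur acc ≠ [] := by
  induction fuel generalizing s cur acc with
  | zero => simp [PySem.Chars.splitOn.go]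
  | succ n ih =>
    cases s with
    | nil => simp [PySem.Chars.splitOn.go]
    | cons c rest =>
      rw [PySem.Chars.splitOn.go]
      by_cases hp : sep.isPrefixOf (c :: rest) = true
      · simp only [hp, if_true]
        exact ih _ _ _
      · simp only [hp, if_false, Bool.false_eq_true]
        exact ih _ _ _

-- a list containing the separator splits into at least two pieces
theorem pvSplitOnTwo (ch : Char) (s : List Char) (hm : ch ∈ s) :
    ∃ a t, PySem.Chars.splitOn s [ch] = a :: t ∧ t ≠ [] := by
  have h0 : 0 ≤ PySem.Chars.find s [ch] := by
    rw [PySem.Chars.find_nonneg_iff, List.singleton_infix_iff]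
    exact hm
  obtain ⟨hdec, hnm⟩ := pvFindDecomp ch s h0
  refine ⟨s.take (PySem.Chars.find s [ch]).toNat,
    PySem.Chars.splitOn (s.drop ((PySem.Chars.find s [ch]).toNat + 1)) [ch], ?_, ?_⟩
  · conv_lhs => rw [hdec]
    exact pvSplitOnFirst ch _ _ hnm
  · unfold PySem.Chars.splitOn
    exact pvGoNeNil _ _ _ _ _

-- A's per-token handling, at char level (proof-side restatement of A's comma-loop body)
def pvTokenA (cs : List Char) : Option (List Int) :=
  if PySem.Chars.isIn ['-'] cs then
    match PySem.Chars.splitOn cs ['-'] with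
    | [a, b] =>
      match PySem.Int.ofChars? a, PySem.Int.ofChars? b with
      | some lo, some hi => some (PySem.List.pyRange lo (hi + 1) 1)
      | _, _ => none
    | _ => none
  else (PySem.Int.ofChars? cs).map (fun v => [v])

-- pvInt2 over A's string-level split is pvTokenA's char-level match
theorem pvInt2_splitOn (cs : List Char) :
    (pvInt2 ((PySem.Str.split? (String.ofList cs) "-").getD [])).map
        (fun (se : Int × Int) => PySem.List.pyRange se.1 (se.2 + 1) 1)
      = (match PySem.Chars.splitOn cs ['-'] with
         | [a, b] =>
           match PySem.Int.ofChars? a, PySem.Int.ofChars? b with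
           | some lo, some hi => some (PySem.List.pyRange lo (hi + 1) 1)
           | _, _ => none
         | _ => none) := by
  show (pvInt2 (((PySem.Chars.split? (String.ofList cs).toList "-".toList).map
      (List.map String.ofList)).getD [])).map _ = _
  simp only [String.toList_ofList]
  have : ("-".toList) = ['-'] := rfl
  rw [this]
  unfold PySem.Chars.split?
  simp only [List.isEmpty_cons, Bool.false_eq_true, if_false, Option.map_some, Option.getD_some]
  cases hsp : PySem.Chars.splitOn cs ['-'] with
  | nil => simp [pvInt2]
  | cons a t =>
    cases t with
    | nil => simp [pvInt2]
    | cons b t2 =>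
      cases t2 with
      | nil =>
        simp only [List.map_cons, List.map_nil, pvInt2]
        show ((match PySem.Int.ofStr? (String.ofList a), PySem.Int.ofStr? (String.ofList b) with
          | some s, some e => some (s, e) | _, _ => none).map
            (fun (se : Int × Int) => PySem.List.pyRange se.1 (se.2 + 1) 1)) = _
        show ((match PySem.Int.ofChars? (String.ofList a).toList,
                    PySem.Int.ofChars? (String.ofList b).toList with
          | some s, some e => some (s, e) | _, _ => none).map _) = _
        simp only [String.toList_ofList]
        cases PySem.Int.ofChars? a <;> cases PySem.Int.ofChars? b <;> simp
      | cons c t3 => simp [pvInt2]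

-- pvTokenA written with A's string-level tests and split
theorem pvTokenA_eq_A (p : String) :
    pvTokenA p.toList
      = if PySem.Str.isIn "-" p then
          (pvInt2 ((PySem.Str.split? p "-").getD [])).map
            (fun (se : Int × Int) => PySem.List.pyRange se.1 (se.2 + 1) 1)
        else (PySem.Int.ofStr? p).map (fun v => [v]) := by
  unfold pvTokenA
  have hb : PySem.Chars.isIn ['-'] p.toList = PySem.Str.isIn "-" p := by
    have : ("-".toList) = ['-'] := rfl
    rw [← this]
    simp
  rw [hb]
  by_cases hd : PySem.Str.isIn "-" p = true
  · simp only [hd, if_true]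
    have := pvInt2_splitOn p.toList
    rw [show String.ofList p.toList = p from by simp] at this
    exact this.symm
  · simp only [hd, Bool.false_eq_true, if_false]
    rfl

-- B's _expand computes exactly A's per-token result
theorem pvExpand_eq_tokenA (cs : List Char) : pvExpand cs = pvTokenA cs := by
  unfold pvExpand pvTokenA
  by_cases hneg : PySem.Chars.find cs ['-'] < 0
  · have hnm : '-' ∉ cs := pvNotMemOfFindNeg '-' cs hneg
    have hin : PySem.Chars.isIn ['-'] cs = false := by
      rw [PySem.Chars.isIn_eq_false_iff]
      intro hinf
      exact hnm ((List.singleton_infix_iff _ _).mp hinf)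
    simp [hneg, hin]
  · have h0 : 0 ≤ PySem.Chars.find cs ['-'] := by omega
    obtain ⟨hdec, hnm⟩ := pvFindDecomp '-' cs h0
    set d := (PySem.Chars.find cs ['-']).toNat with hdd
    have hdi : PySem.Chars.find cs ['-'] = (d : Int) := by omega
    have hin : PySem.Chars.isIn ['-'] cs = true := by
      rw [PySem.Chars.isIn_iff_infix, List.singleton_infix_iff, hdec]
      exact List.mem_append_right _ List.mem_cons_self
    simp only [hneg, if_false, hin, if_true]
    have hslice_to : PySem.List.slice cs none (some (PySem.Chars.find cs ['-'])) = cs.take d := by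
      rw [PySem.List.slice_to _ h0]
    have hslice_from : PySem.List.slice cs (some (PySem.Chars.find cs ['-'] + 1)) none
        = cs.drop (d + 1) := by
      rw [PySem.List.slice_from _ (by omega : (0:Int) ≤ PySem.Chars.find cs ['-'] + 1)]
      congr 1
      omega
    rw [hslice_to, hslice_from]
    have hsp : PySem.Chars.splitOn cs ['-'] = cs.take d :: PySem.Chars.splitOn (cs.drop (d + 1)) ['-'] := by
      conv_lhs => rw [hdec]
      exact pvSplitOnFirst '-' _ _ hnm
    rw [hsp]
    by_cases htail : PySem.Chars.isIn ['-'] (cs.drop (d + 1)) = true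
    · -- a second dash: A's split has ≥ 3 pieces, B raises
      have hmem : '-' ∈ cs.drop (d + 1) :=
        (List.singleton_infix_iff _ _).mp ((PySem.Chars.isIn_iff_infix _ _).mp htail)
      obtain ⟨a, t, hat, htne⟩ := pvSplitOnTwo '-' _ hmem
      rw [hat]
      simp only [htail, if_true]
      cases t with
      | nil => exact absurd rfl htne
      | cons x xs => rfl
    · have htail' : PySem.Chars.isIn ['-'] (cs.drop (d + 1)) = false := by
        simpa using htail
      have hnm' : '-' ∉ cs.drop (d + 1) := by
        intro hm
        exact htail ((PySem.Chars.isIn_iff_infix _ _).mpr ((List.singleton_infix_iff _ _).mpr hm))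
      rw [pvSplitOnNo '-' _ hnm']
      simp only [htail', Bool.false_eq_true, if_false]

-- B's recursion equals token-wise expansion over A's comma-split token list
theorem pvPortsOf_eq_mapM (s : List Char) :
    pvPortsOf s = ((PySem.Chars.splitOn s [',']).mapM pvExpand).map List.flatten := by
  induction hn : s.length using Nat.strong_induction_on generalizing s with
  | _ n ih =>
  rw [pvPortsOf]
  by_cases hneg : PySem.Chars.find s [','] < 0
  · have hnm : ',' ∉ s := pvNotMemOfFindNeg ',' s hneg
    rw [pvSplitOnNo ',' s hnm]
    simp only [hneg, dif_pos, List.mapM_cons, List.mapM_nil]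
    cases pvExpand s <;> simp
  · have h0 : 0 ≤ PySem.Chars.find s [','] := by omega
    obtain ⟨hdec, hnm⟩ := pvFindDecomp ',' s h0
    set d := (PySem.Chars.find s [',']).toNat with hdd
    have hslice_to : PySem.List.slice s none (some (PySem.Chars.find s [','])) = s.take d := by
      rw [PySem.List.slice_to _ h0]
    have hslice_from : PySem.List.slice s (some (PySem.Chars.find s [','] + 1)) none
        = s.drop (d + 1) := by
      rw [PySem.List.slice_from _ (by omega)]
      congr 1
      omega
    have hsp : PySem.Chars.splitOn s [','] = s.take d :: PySem.Chars.splitOn (s.drop (d + 1)) [','] := by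
      conv_lhs => rw [hdec]
      exact pvSplitOnFirst ',' _ _ hnm
    have hlt : d < s.length := by
      by_contra hge
      have h1 : s.take d = s := List.take_of_length_le (by omega)
      have h2 : (s.take d).length = s.length := by rw [h1]
      have := hdec
      rw [h1] at this
      have := congrArg List.length this
      simp at this
    have hih : pvPortsOf (s.drop (d + 1))
        = ((PySem.Chars.splitOn (s.drop (d + 1)) [',']).mapM pvExpand).map List.flatten := by
      exact ih (s.drop (d + 1)).length (by simp; omega) _ rfl
    simp only [hneg, dif_neg, not_false_iff]
    rw [hslice_to, hslice_from, hih, hsp]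
    rw [List.mapM_cons]
    cases pvExpand (s.take d) with
    | none => simp
    | some hd =>
      cases (PySem.Chars.splitOn (s.drop (d + 1)) [',']).mapM pvExpand with
      | none => simp
      | some tls => simp

-- A's comma-branch loop equals mapM of A's per-token handler over the same tokens
theorem pvCommaLoopA_eq_mapM (toks : List String) (acc : List Int) :
    pvCommaLoopA toks acc
      = ((toks.mapM (fun p => pvTokenA p.toList)).map (fun cs => acc ++ cs.flatten)) := by
  induction toks generalizing acc with
  | nil => simp [pvCommaLoopA, List.mapM_nil]
  | cons p rest ih =>
    rw [pvCommaLoopA, List.mapM_cons, pvTokenA_eq_A]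
    by_cases hd : PySem.Str.isIn "-" p = true
    · simp only [hd, if_true]
      cases pvInt2 ((PySem.Str.split? p "-").getD []) with
      | none => simp
      | some se =>
        obtain ⟨lo, hi⟩ := se
        cases h3 : rest.mapM (fun p => pvTokenA p.toList) <;> simp [ih, h3]
    · simp only [hd, if_false, Bool.false_eq_true]
      show (match PySem.Int.ofStr? p with
        | some v => pvCommaLoopA rest (acc ++ [v]) | none => none) = _
      cases hof : PySem.Int.ofStr? p with
      | none => simp
      | some v =>
        cases h3 : rest.mapM (fun p => pvTokenA p.toList) <;> simp [ih, h3]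

-- ===== VERDICT (by name: the statement is the Claim_ definition above) =====
theorem parse_nmap_args_py_spec : Claim_equal_parse_nmap_args_py := by
  intro args _
  unfold Spec_parse_nmap_args_py parse_nmap_args_py parse_nmap_args_py_alt
  cases args with
  | none => rfl
  | some l =>
    by_cases hl : l.isEmpty = true
    · simp [hl]
    · simp only [hl, if_false, Bool.false_eq_true]
      unfold pvTryBodyA
      cases hidx : PySem.List.index? l "-p" with
      | none => rfl
      | some p_idx =>
        by_cases hlen : p_idx + 1 < l.length
        · simp only [hlen, if_true]
          set t := l.getD (p_idx + 1) "" with ht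
          rw [pvPortsOf_eq_mapM]
          by_cases hdash : t = "-"
          · rw [hdash]
            decide
          · have hne : (t == "-") = false := by
              simp only [beq_eq_false_iff_ne, ne_eq]
              exact hdash
            simp only [hne, Bool.false_eq_true, if_false]
            by_cases hcomma : PySem.Str.isIn "," t = true
            · simp only [hcomma, if_true]
              rw [pvCommaLoopA_eq_mapM]
              have hsplit : (PySem.Str.split? t ",").getD []
                  = (PySem.Chars.splitOn t.toList [',']).map String.ofList := by
                show ((PySem.Chars.split? t.toList (",".toList)).map (List.map String.ofList)).getD [] = _
                have : (",".toList) = [','] := rfl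
                rw [this]
                unfold PySem.Chars.split?
                simp
              rw [hsplit]
              have hmm : ((PySem.Chars.splitOn t.toList [',']).map String.ofList).mapM
                    (fun p => pvTokenA p.toList)
                  = (PySem.Chars.splitOn t.toList [',']).mapM pvExpand := by
                induction PySem.Chars.splitOn t.toList [','] with
                | nil => rfl
                | cons a rest ih2 =>
                  simp only [List.map_cons, List.mapM_cons, String.toList_ofList, ih2,
                    pvExpand_eq_tokenA]
              rw [hmm]
              cases (PySem.Chars.splitOn t.toList [',']).mapM pvExpand <;> simp
            · have hcomma' : PySem.Str.isIn "," t = false := by simpa using hcomma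
              have hnm : ',' ∉ t.toList := by
                intro hm
                have h1 : PySem.Chars.isIn (",".toList) t.toList = true := by
                  have : (",".toList) = [','] := rfl
                  rw [this, PySem.Chars.isIn_iff_infix, List.singleton_infix_iff]
                  exact hm
                have : PySem.Str.isIn "," t = true := by simpa using h1
                exact absurd this (by simpa using hcomma)
              rw [show t.toList = (String.ofList t.toList).toList from by simp] at hnm
              rw [show (PySem.Chars.splitOn t.toList [','])
                  = PySem.Chars.splitOn (String.ofList t.toList).toList [','] from by simp]
              rw [pvSplitOnNo ',' _ hnm]
              simp only [List.mapM_cons, List.mapM_nil, String.toList_ofList]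
              simp only [hcomma', Bool.false_eq_true, if_false]
              rw [pvExpand_eq_tokenA, pvTokenA_eq_A]
              by_cases hd2 : PySem.Str.isIn "-" t = true
              · simp only [hd2, if_true]
                cases pvInt2 ((PySem.Str.split? t "-").getD []) with
                | none => simp
                | some se => obtain ⟨lo, hi⟩ := se; simp
              · simp only [hd2, Bool.false_eq_true, if_false]
                cases PySem.Int.ofStr? t <;> simp
        · simp [hlen]
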